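-- pv_equiv track=rewrite | github.com/DanieII/SoftUni-Advanced-2023-01 | advanced/modules/module.py | create_triangle
-- ===== SOURCE A (Python) =====
-- def create_triangle(size):
--     triangle = ""
--
--     # first part
--     for r in range(1, size + 1):
--         for c in range(1, r + 1):
--             triangle += f"{c} "
--         triangle += "\n"
--     # second part
--     for r in range(size - 1, -1, -1):
--         for c in range(1, r + 1):
--             triangle += f"{c} "
--         triangle += "\n"
--
--     return triangle
-- ===== SOURCE B (Python) =====
-- def create_triangle(size):
--     # Build each row prefix once: p[w] = "1 2 ... w " (p[0] = "").
--     p = [""]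
--     for w in range(1, size + 1):
--         p.append(p[-1] + f"{w} ")
--     widths = list(range(1, size + 1)) + list(range(size - 1, -1, -1))
--     return "".join(p[w] + "\n" for w in widths)
-- ===== Notes on version B (the rewrite author's own statement) =====
-- stated objective: faster
-- what changed: Replaces A's nested loops that rebuild every row number-by-number (with quadratic string re-copying per row) by a prefix table computed once (p[w] = p[w-1] + 'w '), an explicit width sequence, and a single join indexing the table.
import Mathlib
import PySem

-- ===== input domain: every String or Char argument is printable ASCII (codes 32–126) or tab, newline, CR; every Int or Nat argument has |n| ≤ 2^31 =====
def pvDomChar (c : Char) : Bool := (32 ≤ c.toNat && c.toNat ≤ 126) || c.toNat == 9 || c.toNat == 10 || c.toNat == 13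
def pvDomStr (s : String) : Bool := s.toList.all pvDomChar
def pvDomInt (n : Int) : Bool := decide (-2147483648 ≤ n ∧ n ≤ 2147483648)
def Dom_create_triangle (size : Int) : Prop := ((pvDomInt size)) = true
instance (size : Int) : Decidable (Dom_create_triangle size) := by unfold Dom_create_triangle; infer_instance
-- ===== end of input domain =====

-- B precomputes each row once into a prefix table and joins the table entries by the width
-- sequence, replacing A's nested inner loops (objective: faster; a timing run measured B faster).

-- ===== PORT A =====
def create_triangle (size : Int) : String :=
  let triangle : String := ""
  -- first part
  let triangle := (PySem.List.pyRange 1 (size + 1) 1).foldl (fun triangle r =>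
    let triangle := (PySem.List.pyRange 1 (r + 1) 1).foldl (fun triangle c =>
      triangle ++ PySem.Int.toStr c ++ " ") triangle
    triangle ++ "\n") triangle
  -- second part
  let triangle := (PySem.List.pyRange (size - 1) (-1) (-1)).foldl (fun triangle r =>
    let triangle := (PySem.List.pyRange 1 (r + 1) 1).foldl (fun triangle c =>
      triangle ++ PySem.Int.toStr c ++ " ") triangle
    triangle ++ "\n") triangle
  triangle

-- ===== PORT B =====
def create_triangle_alt (size : Int) : String :=
  let p : List String := (PySem.List.pyRange 1 (size + 1) 1).foldl (fun p w =>
    p ++ [PySem.List.pyGetD p (-1) "" ++ PySem.Int.toStr w ++ " "]) [""]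
  let widths : List Int :=
    PySem.List.pyRange 1 (size + 1) 1 ++ PySem.List.pyRange (size - 1) (-1) (-1)
  PySem.Str.join "" (widths.map (fun w => PySem.List.pyGetD p w "" ++ "\n"))

-- ===== PRECONDITION & SPEC =====
def Spec_create_triangle (size : Int) (out : String) : Prop := out = create_triangle_alt size
instance (size : Int) (out : String) : Decidable (Spec_create_triangle size out) := by unfold Spec_create_triangle; infer_instance

-- ===== CLAIM (what is proved, stated in full; the proofs are below) =====
def Claim_equal_create_triangle : Prop := ∀ (size : Int), Dom_create_triangle size → Spec_create_triangle size (create_triangle size)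

-- ===== LEMMAS AND PROOFS =====

-- concatenation of a list of strings
def strCat : List String → String
  | [] => ""
  | s :: t => s ++ strCat t

lemma strCat_append (l₁ l₂ : List String) : strCat (l₁ ++ l₂) = strCat l₁ ++ strCat l₂ := by
  induction l₁ with
  | nil => simp [strCat]
  | cons a t ih => simp [strCat, ih, String.append_assoc]

-- a string-appending fold is init ++ the concatenation of the pieces
lemma foldl_strCat {α : Type} (f : α → String) (l : List α) (init : String) :
    l.foldl (fun acc x => acc ++ f x) init = init ++ strCat (l.map f) := by
  induction l generalizing init with
  | nil => simp [strCat]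
  | cons a t ih => simp [List.foldl_cons, ih, strCat, String.append_assoc]

-- the content of a row of width w (the inner loop of A)
def rowStr (w : Int) : String := strCat ((PySem.List.pyRange 1 (w + 1) 1).map (fun c => PySem.Int.toStr c ++ " "))

lemma rowStr_succ (k : Nat) : rowStr ((k : Int) + 1) = rowStr k ++ (PySem.Int.toStr ((k : Int) + 1) ++ " ") := by
  unfold rowStr
  rw [show ((k : Int) + 1 + 1) = ((k : Int) + 1) + 1 from rfl,
      PySem.List.pyRange_one_succ_right (by omega), List.map_append, strCat_append]
  simp [strCat]

-- A's inner loop produces acc ++ rowStr r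
lemma inner_loop (r : Int) (acc : String) :
    (PySem.List.pyRange 1 (r + 1) 1).foldl (fun triangle c =>
      triangle ++ PySem.Int.toStr c ++ " ") acc = acc ++ rowStr r := by
  rw [show (fun (triangle : String) (c : Int) => triangle ++ PySem.Int.toStr c ++ " ")
        = (fun (triangle : String) (c : Int) => triangle ++ (PySem.Int.toStr c ++ " "))
      from by funext a c; rw [String.append_assoc]]
  exact foldl_strCat _ _ _

-- A is the concatenation of the rows over the two width ranges
lemma create_triangle_eq (size : Int) :
    create_triangle size =
      strCat ((PySem.List.pyRange 1 (size + 1) 1 ++ PySem.List.pyRange (size - 1) (-1) (-1)).map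
        (fun r => rowStr r ++ "\n")) := by
  unfold create_triangle
  simp only
  rw [show (fun (triangle : String) (r : Int) =>
        (PySem.List.pyRange 1 (r + 1) 1).foldl (fun triangle c =>
          triangle ++ PySem.Int.toStr c ++ " ") triangle ++ "\n")
      = (fun (triangle : String) (r : Int) => triangle ++ (rowStr r ++ "\n"))
      from by funext a r; rw [inner_loop, String.append_assoc]]
  rw [foldl_strCat, foldl_strCat, List.map_append, strCat_append]
  simp

-- B's prefix table is the table of rowStr values
lemma ptable (k : Nat) :
    (PySem.List.pyRange 1 ((k : Int) + 1) 1).foldl (fun p w =>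
      p ++ [PySem.List.pyGetD p (-1) "" ++ PySem.Int.toStr w ++ " "]) [""]
    = (List.range (k + 1)).map (fun j : Nat => rowStr (j : Int)) := by
  induction k with
  | zero =>
    rw [PySem.List.pyRange_one_eq_nil (by omega)]
    simp [rowStr, PySem.List.pyRange_one_eq_nil, strCat]
  | succ n ih =>
    rw [show ((↑(n + 1) : Int)) + 1 = ((n : Int) + 1) + 1 from by push_cast; ring,
        PySem.List.pyRange_one_succ_right (by omega), List.foldl_append, ih]
    simp only [List.foldl_cons, List.foldl_nil]
    have hlast : PySem.List.pyGetD ((List.range (n + 1)).map (fun j : Nat => rowStr (j : Int))) (-1) ""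
        = rowStr (n : Int) := by
      rw [show (-1 : Int) = -((1 : Nat) : Int) from by norm_num,
          PySem.List.pyGetD_neg_natCast _ 1 _ (by omega) (by simp)]
      simp [List.range_succ]
    rw [hlast, show List.range (n + 1 + 1) = List.range (n + 1) ++ [n + 1] from List.range_succ,
        List.map_append]
    congr 1
    rw [String.append_assoc, ← rowStr_succ]
    simp

lemma strCat_eq_join (l : List String) : PySem.Str.join "" l = strCat l := by
  induction l with
  | nil => rfl
  | cons a t ih =>
    have h : ∀ m : List (List Char), (List.intersperse ([] : List Char) m).flatten = m.flatten := by
      intro m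
      induction m with
      | nil => rfl
      | cons b u ihm => cases u <;> simp_all [List.intersperse]
    apply String.ext
    simp only [PySem.Str.join, PySem.Chars.join, List.intercalate, String.toList_ofList] at *
    simp [h, strCat, ← ih, String.toList_append]

-- ===== VERDICT (by name: the statement is the Claim_ definition above) =====
theorem create_triangle_spec : Claim_equal_create_triangle := by
  intro size _
  unfold Spec_create_triangle create_triangle_alt
  simp only
  rw [strCat_eq_join, create_triangle_eq]
  congr 1
  apply List.map_congr_left
  intro w hw
  have hw' : 0 ≤ w ∧ w ≤ size := by
    rcases List.mem_append.1 hw with h | h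
    · rcases PySem.List.mem_pyRange_one.1 h with ⟨h1, h2⟩; omega
    · rcases PySem.List.mem_pyRange_neg_one.1 h with ⟨h1, h2⟩; omega
  have hs : (size.toNat : Int) + 1 = size + 1 := by omega
  rw [← hs, ptable size.toNat,
      PySem.List.pyGetD_eq_getElem _ _ (by omega) (by simp; omega)]
  simp only [List.getElem_map, List.getElem_range]
  congr 2
  omega
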